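-- pv_equiv track=rewrite | github.com/pypi-data/pypi-mirror-208 | packages/text2story/text2story-1.2.5-py3-none-any.whl/text2story/training/participant_concept.py | get_sents_offset
-- ===== SOURCE A (Python) =====
-- def get_sents_offset(sent_lst):
--     sent_offset_lst = []
--     offset_start = 0
--     for sent in sent_lst:
--         offset_end = offset_start + len(sent) - 1
--         sent_offset_lst.append((offset_start, offset_end))
--         offset_start = offset_end
--     return sent_offset_lst
-- ===== SOURCE B (Python) =====
-- def get_sents_offset(sent_lst):
--     # two separate passes: a prefix-sum table of starts, then pair-building
--     lens = [len(s) for s in sent_lst]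
--     starts = [0]
--     for L in lens[:-1]:
--         starts.append(starts[-1] + L - 1)
--     return [(st, st + L - 1) for st, L in zip(starts, lens)]
-- ===== Notes on version B (the rewrite author's own statement) =====
-- stated objective: alternative
-- what changed: Replaced the single fused accumulator loop with two separate passes: first a prefix-sum table of running start offsets over the sentence lengths, then a zip pass that pairs each start with its end.
import Mathlib
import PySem

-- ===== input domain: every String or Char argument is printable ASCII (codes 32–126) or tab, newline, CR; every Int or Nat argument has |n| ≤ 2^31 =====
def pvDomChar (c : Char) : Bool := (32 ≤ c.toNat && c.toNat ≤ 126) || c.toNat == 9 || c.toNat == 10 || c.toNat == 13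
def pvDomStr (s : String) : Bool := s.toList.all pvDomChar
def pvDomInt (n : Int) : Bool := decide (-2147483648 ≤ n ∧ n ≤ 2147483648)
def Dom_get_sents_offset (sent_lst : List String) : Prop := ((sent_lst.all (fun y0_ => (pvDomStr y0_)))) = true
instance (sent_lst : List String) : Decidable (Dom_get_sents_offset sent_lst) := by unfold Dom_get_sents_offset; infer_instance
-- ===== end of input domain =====

-- B replaces A's single fused accumulator loop with two separate passes (prefix-sum table of starts, then a zip pass); same cost, different decomposition.

-- ===== PORT A =====
-- one fused loop carrying (sent_offset_lst, offset_start)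
def get_sents_offset (sent_lst : List String) : List (Int × Int) :=
  (sent_lst.foldl
    (fun (acc : List (Int × Int) × Int) sent =>
      let offset_end := acc.2 + (PySem.Str.len sent : Int) - 1
      (acc.1 ++ [(acc.2, offset_end)], offset_end))
    ([], 0)).1

-- ===== PORT B =====
-- pass 1: lens; pass 2: starts prefix table (lens[:-1] = dropLast, exact for all lists;
-- starts[-1] = getLastD, exact since starts is always nonempty); pass 3: zip pair-building
def get_sents_offset_alt (sent_lst : List String) : List (Int × Int) :=
  let lens := sent_lst.map (fun s => (PySem.Str.len s : Int))
  let starts := lens.dropLast.foldl (fun (acc : List Int) L => acc ++ [acc.getLastD 0 + L - 1]) [0]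
  (starts.zip lens).map (fun p => (p.1, p.1 + p.2 - 1))

-- ===== PRECONDITION & SPEC =====
def Spec_get_sents_offset (sent_lst : List String) (out : List (Int × Int)) : Prop := out = get_sents_offset_alt sent_lst
instance (sent_lst : List String) (out : List (Int × Int)) : Decidable (Spec_get_sents_offset sent_lst out) := by unfold Spec_get_sents_offset; infer_instance

-- ===== CLAIM (what is proved, stated in full; the proofs are below) =====
def Claim_equal_get_sents_offset : Prop := ∀ (sent_lst : List String), Dom_get_sents_offset sent_lst → Spec_get_sents_offset sent_lst (get_sents_offset sent_lst)

-- ===== LEMMAS AND PROOFS =====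

-- reference: the pair stream generated from offset s over a list of lengths
def pvG (s : Int) : List Int → List (Int × Int)
  | [] => []
  | L :: ls => (s, s + L - 1) :: pvG (s + L - 1) ls

-- reference: the starts scan from offset s
def pvScan (s : Int) : List Int → List Int
  | [] => [s]
  | L :: ls => s :: pvScan (s + L - 1) ls

theorem pvA_foldl (ls : List String) (acc : List (Int × Int)) (s : Int) :
    (ls.foldl
      (fun (acc : List (Int × Int) × Int) sent =>
        let e := acc.2 + (PySem.Str.len sent : Int) - 1
        (acc.1 ++ [(acc.2, e)], e))
      (acc, s)).1 = acc ++ pvG s (ls.map (fun t => (PySem.Str.len t : Int))) := by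
  induction ls generalizing acc s with
  | nil => simp [pvG]
  | cons h t ih =>
    simp only [List.foldl]
    rw [ih]
    simp [pvG]

theorem pvB_scan (ls : List Int) (p : List Int) (s : Int) :
    (ls.foldl (fun (acc : List Int) L => acc ++ [acc.getLastD 0 + L - 1]) (p ++ [s]))
      = p ++ pvScan s ls := by
  induction ls generalizing p s with
  | nil => simp [pvScan]
  | cons L t ih =>
    have : (p ++ [s]) ++ [(p ++ [s]).getLastD 0 + L - 1] = (p ++ [s]) ++ [s + L - 1] := by
      simp
    simp only [List.foldl, this]
    rw [ih (p ++ [s]) (s + L - 1)]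
    simp [pvScan]

theorem pvB_zip (ls : List Int) (s : Int) :
    ((pvScan s ls.dropLast).zip ls).map (fun p => (p.1, p.1 + p.2 - 1)) = pvG s ls := by
  induction ls generalizing s with
  | nil => simp [pvScan, pvG]
  | cons L t ih =>
    cases t with
    | nil => simp [pvScan, pvG]
    | cons L2 t2 =>
      simp only [List.dropLast_cons₂, pvScan, List.zip_cons_cons, List.map_cons, pvG]
      exact congrArg _ (ih (s + L - 1))

-- ===== VERDICT (by name: the statement is the Claim_ definition above) =====
theorem get_sents_offset_spec : Claim_equal_get_sents_offset := by
  intro sent_lst _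
  unfold Spec_get_sents_offset get_sents_offset get_sents_offset_alt
  dsimp only
  rw [pvA_foldl sent_lst [] 0]
  have hs := pvB_scan (sent_lst.map (fun s => (PySem.Str.len s : Int))).dropLast [] 0
  simp only [List.nil_append] at hs ⊢
  rw [hs, pvB_zip]
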